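-- pv_equiv track=rewrite | github.com/Salvanim/Personal | Python/createCSVFrom2d.py | generateArrayString
-- ===== SOURCE A (Python) =====
-- def isIterable(val):
--     try:
--         iter(val)
--     except TypeError:
--         return False
--     return True
--
-- def get_depth(arr):
--     if isIterable(arr) and type(arr) != str and arr:
--         return 1 + max(get_depth(item) for item in arr)
--     else:
--         return 0
--
-- def generateArrayString(array, startingString='', count=0, savedArray=None, prev_depth=0):
--     outputString = startingString
--     index = 0
--     if count == 0:
--         savedArray = array if savedArray is None else savedArray
--
--     for arr in array:
--         current_depth = get_depth(arr)
--         depth_difference = current_depth - prev_depth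
--         if depth_difference >= 0:
--             outputString += '\n' * (depth_difference+1)
--
--         if isIterable(arr) and not isinstance(arr, str):
--             outputString = generateArrayString(arr, outputString, count+1, savedArray, current_depth)
--             outputString += '\n'
--         else:
--             outputString += str(arr)
--             if index != len(array) - 1:
--                 outputString += ","
--         index += 1
--     return outputString
-- ===== SOURCE B (Python) =====
-- def _depth(x):
--     """Nesting depth: 0 for scalars and empty lists, else 1 + max child depth."""
--     if isinstance(x, list) and x:
--         return 1 + max(map(_depth, x))
--     return 0
--
-- def generateArrayString(array, startingString='', count=0, savedArray=None, prev_depth=0):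
--     """Render each row as a comma-joined line, preceded by blank-line padding
--     proportional to how much deeper the row nests than prev_depth."""
--     pieces = [startingString]
--     for row in array:
--         d = _depth(row)
--         if d >= prev_depth:
--             pieces.append('\n' * (d - prev_depth + 1))
--         pieces.append(','.join(map(str, row)))
--         pieces.append('\n')
--     return ''.join(pieces)
-- ===== Notes on version B (the rewrite author's own statement) =====
-- stated objective: simpler
-- what changed: Replaced the recursive per-row self-call (threading count/savedArray and building the string by repeated concatenation) with one flat loop that computes each row's nesting depth via a small recursive _depth helper, collects the row's pieces (padding, comma-joined elements, newline), and joins everything once at the end.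
import Mathlib
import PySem

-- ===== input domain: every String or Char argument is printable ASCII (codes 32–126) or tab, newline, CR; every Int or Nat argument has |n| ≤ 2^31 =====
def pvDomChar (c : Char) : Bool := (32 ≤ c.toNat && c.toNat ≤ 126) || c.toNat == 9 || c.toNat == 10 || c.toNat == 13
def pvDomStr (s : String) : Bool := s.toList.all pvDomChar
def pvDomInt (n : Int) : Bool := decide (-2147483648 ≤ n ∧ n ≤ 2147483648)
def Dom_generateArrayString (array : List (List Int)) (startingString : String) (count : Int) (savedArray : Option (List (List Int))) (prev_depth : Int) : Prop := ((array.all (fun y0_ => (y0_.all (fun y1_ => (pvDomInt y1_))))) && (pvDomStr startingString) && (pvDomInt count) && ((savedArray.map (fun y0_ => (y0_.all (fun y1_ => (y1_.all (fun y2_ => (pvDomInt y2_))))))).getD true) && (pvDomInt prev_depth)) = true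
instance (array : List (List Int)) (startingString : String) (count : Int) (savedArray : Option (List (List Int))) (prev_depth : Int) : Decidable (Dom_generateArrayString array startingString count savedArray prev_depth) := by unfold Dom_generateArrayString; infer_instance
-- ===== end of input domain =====

-- B replaces the per-row recursive self-call (with its count/savedArray threading and
-- string concatenation) by one flat loop collecting pieces and a single final join (simpler).

-- ===== PORT A =====
-- '\n' * n  (Python string repetition)
def pvStrTimes (s : String) (n : Int) : String := String.ofList (PySem.List.pyRepeat s.toList n)

-- get_depth applied to an int element: not iterable, so 0
def pvGetDepthInt (_x : Int) : Int := 0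

-- get_depth applied to a row (list of ints): 'if iterable and not str and arr: 1 + max(...) else 0'
def pvGetDepth (arr : List Int) : Int :=
  if arr ≠ [] then
    match PySem.List.max? (arr.map pvGetDepthInt) (fun y => y) with
    | some m => 1 + m
    | none => 0   -- unreachable: arr ≠ []
  else 0

-- the for-loop of the recursive call generateArrayString(arr, …) on a row arr : List Int;
-- every element is an int (never iterable), so only the else-branch of the Python 'if' occurs
def pvInnerLoop (total : Int) (arr : List Int) (outputString : String) (index : Int) (prev_depth : Int) : String :=
  match arr with
  | [] => outputString
  | x :: rest =>
    let current_depth := pvGetDepthInt x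
    let depth_difference := current_depth - prev_depth
    let outputString := if depth_difference ≥ 0 then outputString ++ pvStrTimes "\n" (depth_difference + 1) else outputString
    let outputString := outputString ++ PySem.Int.toStr x
    let outputString := if index ≠ total - 1 then outputString ++ "," else outputString
    pvInnerLoop total rest outputString (index + 1) prev_depth

-- the recursive call on a row; its 'count == 0' savedArray rebind is dead (savedArray is never
-- read again in that call: no further recursion happens), so only the loop remains
def pvInner (arr : List Int) (startingString : String) (_count : Int) (prev_depth : Int) : String :=
  pvInnerLoop (arr.length : Int) arr startingString 0 prev_depth

-- the top-level for-loop; 'index' is only read in the non-iterable branch, which a row never takes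
def pvOuterLoop (array : List (List Int)) (outputString : String) (count : Int) (savedArray : Option (List (List Int))) (prev_depth : Int) : String :=
  match array with
  | [] => outputString
  | arr :: rest =>
    let current_depth := pvGetDepth arr
    let depth_difference := current_depth - prev_depth
    let outputString := if depth_difference ≥ 0 then outputString ++ pvStrTimes "\n" (depth_difference + 1) else outputString
    let outputString := pvInner arr outputString (count + 1) current_depth
    let outputString := outputString ++ "\n"
    pvOuterLoop rest outputString count savedArray prev_depth

def generateArrayString (array : List (List Int)) (startingString : String) (count : Int) (savedArray : Option (List (List Int))) (prev_depth : Int) : String :=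
  let savedArray := if count = 0 then (if savedArray = none then some array else savedArray) else savedArray
  pvOuterLoop array startingString count savedArray prev_depth

-- ===== PORT B =====
-- Source B's _depth on a scalar: not a list, so 0
def pvDepthScalar (_x : Int) : Int := 0

-- Source B's _depth on a row: 'if isinstance(x, list) and x: 1 + max(map(_depth, x)) else 0'
def pvDepth (x : List Int) : Int :=
  if x ≠ [] then
    match PySem.List.max? (x.map pvDepthScalar) (fun y => y) with
    | some m => 1 + m
    | none => 0   -- unreachable: x ≠ []
  else 0

-- one loop iteration of Source B: append the pieces this row contributes
def pvStep (prev_depth : Int) (pieces : List String) (row : List Int) : List String :=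
  let d := pvDepth row
  let pieces := if d ≥ prev_depth then pieces ++ [pvStrTimes "\n" (d - prev_depth + 1)] else pieces
  let pieces := pieces ++ [PySem.Str.join "," (row.map PySem.Int.toStr)]
  pieces ++ ["\n"]

def generateArrayString_alt (array : List (List Int)) (startingString : String) (count : Int) (savedArray : Option (List (List Int))) (prev_depth : Int) : String :=
  PySem.Str.join "" (array.foldl (pvStep prev_depth) [startingString])

-- ===== PRECONDITION & SPEC =====
def Spec_generateArrayString (array : List (List Int)) (startingString : String) (count : Int) (savedArray : Option (List (List Int))) (prev_depth : Int) (out : String) : Prop := out = generateArrayString_alt array startingString count savedArray prev_depth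
instance (array : List (List Int)) (startingString : String) (count : Int) (savedArray : Option (List (List Int))) (prev_depth : Int) (out : String) : Decidable (Spec_generateArrayString array startingString count savedArray prev_depth out) := by unfold Spec_generateArrayString; infer_instance

-- ===== CLAIM (what is proved, stated in full; the proofs are below) =====
def Claim_equal_generateArrayString : Prop := ∀ (array : List (List Int)) (startingString : String) (count : Int) (savedArray : Option (List (List Int))) (prev_depth : Int), Dom_generateArrayString array startingString count savedArray prev_depth → Spec_generateArrayString array startingString count savedArray prev_depth (generateArrayString array startingString count savedArray prev_depth)

-- ===== LEMMAS AND PROOFS =====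
theorem pv_join_empty_cons (a : String) (l : List String) :
    PySem.Str.join "" (a :: l) = a ++ PySem.Str.join "" l := by
  cases l with
  | nil => simp [PySem.Str.join]
  | cons b r =>
      apply String.toList_injective
      simp [PySem.Chars.join_cons_cons]

theorem pv_join_append (l1 l2 : List String) :
    PySem.Str.join "" (l1 ++ l2) = PySem.Str.join "" l1 ++ PySem.Str.join "" l2 := by
  induction l1 with
  | nil => simp [PySem.Str.join]
  | cons a r ih =>
      rw [List.cons_append, pv_join_empty_cons, pv_join_empty_cons, ih, String.append_assoc]

theorem pv_join_comma_cons_cons (a b : String) (l : List String) :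
    PySem.Str.join "," (a :: b :: l) = a ++ "," ++ PySem.Str.join "," (b :: l) := by
  apply String.toList_injective
  simp [PySem.Chars.join_cons_cons]

theorem pv_foldl_max_zeros (r : List Int) :
    (r.map pvGetDepthInt).foldl max 0 = 0 := by
  induction r with
  | nil => simp
  | cons x t ih => simpa [pvGetDepthInt] using ih

theorem pv_getDepth_eq (arr : List Int) :
    pvGetDepth arr = if arr ≠ [] then 1 else 0 := by
  cases arr with
  | nil => simp [pvGetDepth]
  | cons x r =>
      simp [pvGetDepth, pvGetDepthInt, PySem.List.max?_id_cons, pv_foldl_max_zeros]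

theorem pv_foldl_max_zeros_b (r : List Int) :
    (r.map pvDepthScalar).foldl max 0 = 0 := by
  induction r with
  | nil => simp
  | cons x t ih => simpa [pvDepthScalar] using ih

theorem pv_depth_eq (row : List Int) :
    pvDepth row = if row ≠ [] then 1 else 0 := by
  cases row with
  | nil => simp [pvDepth]
  | cons x r =>
      simp [pvDepth, pvDepthScalar, PySem.List.max?_id_cons, pv_foldl_max_zeros_b]

theorem pv_inner_loop_eq (l : List Int) :
    ∀ (out : String) (idx total : Int), total = idx + (l.length : Int) →
      pvInnerLoop total l out idx 1 = out ++ PySem.Str.join "," (l.map PySem.Int.toStr) := by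
  induction l with
  | nil => intro out idx total _; simp [pvInnerLoop, PySem.Str.join]
  | cons x rest ih =>
      intro out idx total htot
      simp only [pvInnerLoop, pvGetDepthInt]
      norm_num
      cases rest with
      | nil =>
          have h : idx = total - 1 := by simp at htot; omega
          rw [if_pos h]
          simp [pvInnerLoop, PySem.Str.join, PySem.Int.toStr]
      | cons y r =>
          have h : ¬ idx = total - 1 := by simp at htot; omega
          rw [if_neg h, ih _ (idx + 1) total (by simp at htot ⊢; omega)]
          rw [List.map_cons, pv_join_comma_cons_cons]
          simp only [String.append_assoc]

theorem pv_inner_eq (arr : List Int) (out : String) (c : Int) :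
    pvInner arr out c (pvGetDepth arr) = out ++ PySem.Str.join "," (arr.map PySem.Int.toStr) := by
  cases arr with
  | nil => simp [pvInner, pvInnerLoop, PySem.Str.join]
  | cons x r =>
      have h1 : pvGetDepth (x :: r) = 1 := by simp [pv_getDepth_eq]
      rw [h1]
      simp only [pvInner]
      exact pv_inner_loop_eq (x :: r) out 0 _ (by simp)

theorem pv_join_single (x : String) : PySem.Str.join "" [x] = x := by
  simp [PySem.Str.join]

theorem pv_step_join (pieces : List String) (a : List Int) (pd : Int) :
    ((if pvGetDepth a - pd ≥ 0 then
        PySem.Str.join "" pieces ++ pvStrTimes "\n" (pvGetDepth a - pd + 1)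
      else PySem.Str.join "" pieces) ++ PySem.Str.join "," (a.map PySem.Int.toStr)) ++ "\n"
      = PySem.Str.join "" (pvStep pd pieces a) := by
  simp only [pvStep, pv_getDepth_eq, pv_depth_eq]
  have hiff : ((if a ≠ [] then (1 : Int) else 0) - pd ≥ 0) ↔ ((if a ≠ [] then (1 : Int) else 0) ≥ pd) := by omega
  by_cases hk : (if a ≠ [] then (1 : Int) else 0) ≥ pd
  · rw [if_pos (hiff.mpr hk), if_pos hk]
    simp only [pv_join_append, pv_join_single, String.append_assoc]
  · rw [if_neg (fun h => hk (hiff.mp h)), if_neg hk]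
    simp only [pv_join_append, pv_join_single, String.append_assoc]

theorem pv_outer_loop_eq (arrs : List (List Int)) :
    ∀ (pieces : List String) (c : Int) (sa : Option (List (List Int))) (pd : Int),
      pvOuterLoop arrs (PySem.Str.join "" pieces) c sa pd
        = PySem.Str.join "" (arrs.foldl (pvStep pd) pieces) := by
  induction arrs with
  | nil => intro pieces c sa pd; simp [pvOuterLoop]
  | cons a rest ih =>
      intro pieces c sa pd
      simp only [pvOuterLoop, pv_inner_eq, List.foldl_cons]
      rw [pv_step_join, ih]

-- ===== VERDICT (by name: the statement is the Claim_ definition above) =====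
theorem generateArrayString_spec : Claim_equal_generateArrayString := by
  intro array startingString count savedArray prev_depth _
  show generateArrayString array startingString count savedArray prev_depth
        = generateArrayString_alt array startingString count savedArray prev_depth
  simp only [generateArrayString, generateArrayString_alt]
  have h := pv_outer_loop_eq array [startingString] count
    (if count = 0 then (if savedArray = none then some array else savedArray)
     else savedArray) prev_depth
  rw [pv_join_single] at h
  exact h
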